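-- pv_equiv track=rewrite | github.com/CodingHedgehog-fr/codewars | katas/Kyu_5.py | min_umbrellas
-- ===== SOURCE A (Python) =====
-- def min_umbrellas(weather: list[str]) -> int:
--
--     umbrella_home = umbrella_work = 0
--     home = True
--
--     for cond in weather:
--         if cond in ["rainy", "thunderstorms"]:
--             if home:
--                 umbrella_work += 1
--                 umbrella_home = max(0, umbrella_home - 1)
--             else:
--                 umbrella_home += 1
--                 umbrella_work = max(0, umbrella_work - 1)
--         home = not home
--
--     return umbrella_home + umbrella_work
-- ===== SOURCE B (Python) =====
-- def min_umbrellas(weather: list[str]) -> int: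
--     # Signed prefix-sum walk: +1 on a rainy home->work day (even index),
--     # -1 on a rainy work->home day (odd index); answer is the range of the walk.
--     running = hi = lo = 0
--     for i, cond in enumerate(weather):
--         if cond in ["rainy", "thunderstorms"]:
--             running = running + (1 if i % 2 == 0 else -1)
--             hi = running if running > hi else hi
--             lo = running if running < lo else lo
--     return hi - lo
-- ===== Notes on version B (the rewrite author's own statement) =====
-- stated objective: alternative
-- what changed: Replaces the two zero-clamped umbrella counters with a single signed prefix-sum walk (+1 on rainy even days, -1 on rainy odd days) and returns the range max-min of that walk.
import Mathlib
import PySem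

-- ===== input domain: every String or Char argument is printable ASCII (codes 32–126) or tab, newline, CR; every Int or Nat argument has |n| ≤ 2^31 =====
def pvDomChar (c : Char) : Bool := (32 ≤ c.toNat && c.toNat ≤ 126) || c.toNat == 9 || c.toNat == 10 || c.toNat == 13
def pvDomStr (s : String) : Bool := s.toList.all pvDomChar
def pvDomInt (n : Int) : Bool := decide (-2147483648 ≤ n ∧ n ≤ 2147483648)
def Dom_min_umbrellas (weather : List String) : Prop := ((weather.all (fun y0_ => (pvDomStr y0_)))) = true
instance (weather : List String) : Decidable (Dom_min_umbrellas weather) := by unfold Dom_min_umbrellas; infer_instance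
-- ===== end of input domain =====

-- B replaces A's two zero-clamped counters by one signed prefix-sum walk and returns its range (alternative decomposition, same cost).

-- ===== PORT A =====
-- loop body of A: state (umbrella_home, umbrella_work, home)
def stepA (st : Int × Int × Bool) (cond : String) : Int × Int × Bool :=
  if cond == "rainy" || cond == "thunderstorms" then
    if st.2.2 then (max 0 (st.1 - 1), st.2.1 + 1, !st.2.2)
    else (st.1 + 1, max 0 (st.2.1 - 1), !st.2.2)
  else (st.1, st.2.1, !st.2.2)

def min_umbrellas (weather : List String) : Int :=
  let st := weather.foldl stepA (0, 0, true)
  st.1 + st.2.1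

-- ===== PORT B =====
-- loop body of B: state (running, hi, lo); index i ≥ 0, so Lean's `% 2` agrees with Python's here
def stepB (st : Int × Int × Int) (ic : Int × String) : Int × Int × Int :=
  if ic.2 == "rainy" || ic.2 == "thunderstorms" then
    let r := st.1 + (if ic.1 % 2 == 0 then (1 : Int) else -1)
    (r, if r > st.2.1 then r else st.2.1, if r < st.2.2 then r else st.2.2)
  else st

def min_umbrellas_alt (weather : List String) : Int :=
  let st := (PySem.List.enumerate weather 0).foldl stepB (0, 0, 0)
  st.2.1 - st.2.2

-- ===== PRECONDITION & SPEC =====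
def Spec_min_umbrellas (weather : List String) (out : Int) : Prop := out = min_umbrellas_alt weather
instance (weather : List String) (out : Int) : Decidable (Spec_min_umbrellas weather out) := by unfold Spec_min_umbrellas; infer_instance

-- ===== CLAIM (what is proved, stated in full; the proofs are below) =====
def Claim_equal_min_umbrellas : Prop := ∀ (weather : List String), Dom_min_umbrellas weather → Spec_min_umbrellas weather (min_umbrellas weather)

-- ===== LEMMAS AND PROOFS =====

-- Invariant: A's state is (hi - r, r - lo, parity of next index); lo ≤ r ≤ hi.
lemma umbrellas_inv : ∀ (ws : List String) (s r hi lo : Int), lo ≤ r → r ≤ hi →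
    (ws.foldl stepA (hi - r, r - lo, decide (s % 2 = 0))).1
      + (ws.foldl stepA (hi - r, r - lo, decide (s % 2 = 0))).2.1
    = ((PySem.List.enumerate ws s).foldl stepB (r, hi, lo)).2.1
      - ((PySem.List.enumerate ws s).foldl stepB (r, hi, lo)).2.2 := by
  intro ws
  induction ws with
  | nil =>
    intro s r hi lo h1 h2
    simp [PySem.List.enumerate_nil]

  | cons c ws ih =>
    intro s r hi lo h1 h2
    rw [PySem.List.enumerate_cons]
    simp only [List.foldl_cons]
    by_cases hc : (c == "rainy" || c == "thunderstorms") = true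
    · by_cases hp : s % 2 = 0
      · have hp1 : (s + 1) % 2 = 1 := by omega
        have ha : stepA (hi - r, r - lo, decide (s % 2 = 0)) c
            = (max hi (r + 1) - (r + 1), (r + 1) - lo, decide ((s + 1) % 2 = 0)) := by
          simp [stepA, hc, hp, hp1, max_def]
          split_ifs <;> omega
        have hb : stepB (r, hi, lo) (s, c) = (r + 1, max hi (r + 1), lo) := by
          simp [stepB, hc, hp, max_def]
          split_ifs <;> omega
        rw [ha, hb]
        exact ih (s + 1) (r + 1) (max hi (r + 1)) lo (by omega) (le_max_right _ _)
      · have hp1 : (s + 1) % 2 = 0 := by omega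
        have ha : stepA (hi - r, r - lo, decide (s % 2 = 0)) c
            = (hi - (r - 1), (r - 1) - min lo (r - 1), decide ((s + 1) % 2 = 0)) := by
          simp [stepA, hc, hp, hp1, min_def]
          split_ifs <;> omega
        have hb : stepB (r, hi, lo) (s, c) = (r - 1, hi, min lo (r - 1)) := by
          have hne : (s % 2 == 0) = false := by simp [hp]
          simp [stepB, hc, hne, min_def]
          split_ifs <;> omega
        rw [ha, hb]
        exact ih (s + 1) (r - 1) hi (min lo (r - 1)) (min_le_right _ _) (by omega)
    · have ha : stepA (hi - r, r - lo, decide (s % 2 = 0)) c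
          = (hi - r, r - lo, decide ((s + 1) % 2 = 0)) := by
        by_cases hp : s % 2 = 0
        · have h1' : (s + 1) % 2 = 1 := by omega
          simp [stepA, hc, hp, h1']
        · have hd' : s % 2 = 1 := by omega
          have h1' : (s + 1) % 2 = 0 := by omega
          simp [stepA, hc, hd', h1']
      have hb : stepB (r, hi, lo) (s, c) = (r, hi, lo) := by
        simp [stepB, hc]
      rw [ha, hb]
      exact ih (s + 1) r hi lo h1 h2

-- ===== VERDICT (by name: the statement is the Claim_ definition above) =====
theorem min_umbrellas_spec : Claim_equal_min_umbrellas := by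
  intro weather _
  unfold Spec_min_umbrellas
  have h := umbrellas_inv weather 0 0 0 0 le_rfl le_rfl
  simpa [min_umbrellas, min_umbrellas_alt] using h
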